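-- pv_equiv track=rewrite | github.com/ScienceAndCats/GSU_paper_1 | VIOLIN_by_filtered_mapped_UMI.py | find_prefixes_in_row
-- ===== SOURCE A (Python) =====
-- PREFIXES = [
--     "PA01:",
--     "lkd16:",
--     "luz19:",
--     "14one:",
--     "DH5alpha:",
--     "MG1655:",
--     "pTNS2:",
--     "ambiguous"
-- ]
--
-- def find_prefixes_in_row(contig_genes_str):
--     """
--     Given a string like:
--        "DH5alpha:C1467_RS02470, DH5alpha:C1467_RS06230, MG1655:rrlC"
--     Returns a set of distinct prefixes found, out of the predefined list.
--     """
--     genes = [g.strip() for g in contig_genes_str.split(",")]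
--     found = set()
--     for gene in genes:
--         for pfx in PREFIXES:
--             if gene.startswith(pfx):
--                 found.add(pfx)
--     return found
-- ===== SOURCE B (Python) =====
-- import re
--
-- PREFIXES = [
--     "PA01:",
--     "lkd16:",
--     "luz19:",
--     "14one:",
--     "DH5alpha:",
--     "MG1655:",
--     "pTNS2:",
--     "ambiguous"
-- ]
--
-- # Anchored alternation of the escaped prefixes; one automaton match per gene.
-- _PREFIX_RE = re.compile("^(" + "|".join(re.escape(p) for p in PREFIXES) + ")")
--
-- def find_prefixes_in_row(contig_genes_str):
--     found = set()
--     for gene in contig_genes_str.split(","):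
--         m = _PREFIX_RE.match(gene.strip())
--         if m:
--             found.add(m.group(1))
--     return found
-- ===== Notes on version B (the rewrite author's own statement) =====
-- stated objective: idiomatic
-- what changed: Replaces the nested gene-by-prefix startswith loops with one precompiled anchored regex alternation matched once per stripped gene; correctness of the single-match step rests on a proved pairwise-non-prefix property of the literal prefixes.
import Mathlib
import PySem

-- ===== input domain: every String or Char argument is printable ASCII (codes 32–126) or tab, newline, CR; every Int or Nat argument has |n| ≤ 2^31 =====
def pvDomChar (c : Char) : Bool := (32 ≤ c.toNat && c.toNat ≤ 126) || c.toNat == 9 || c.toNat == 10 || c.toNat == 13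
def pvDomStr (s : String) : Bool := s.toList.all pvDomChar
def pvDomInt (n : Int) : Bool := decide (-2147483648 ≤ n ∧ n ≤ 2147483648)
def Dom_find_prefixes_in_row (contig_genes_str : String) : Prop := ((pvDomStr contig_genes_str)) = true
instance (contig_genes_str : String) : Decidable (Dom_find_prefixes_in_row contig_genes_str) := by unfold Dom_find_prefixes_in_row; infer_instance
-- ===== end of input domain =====

-- B replaces the nested gene×prefix startswith scans with one precompiled anchored
-- regex alternation matched once per gene (idiomatic; same asymptotic cost here).


-- ===== PORT A =====
def PREFIXES : List String :=
  ["PA01:", "lkd16:", "luz19:", "14one:", "DH5alpha:", "MG1655:", "pTNS2:", "ambiguous"]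

def find_prefixes_in_row (contig_genes_str : String) : List String :=
  let genes := ((PySem.Str.split? contig_genes_str ",").getD []).map PySem.Str.strip  -- sep "," ≠ "" so split? is always some
  genes.foldl
    (fun found gene =>
      PREFIXES.foldl
        (fun found pfx =>
          if PySem.Str.startswith gene pfx then PySem.Set.add found pfx else found)
        found)
    PySem.Set.empty

-- ===== PORT B =====
-- Source B matches each stripped gene against the compiled regex '^(p1|p2|…|p8)' whose
-- alternatives are the escaped PREFIXES in order.  For an anchored alternation of
-- literal strings, re.match returns a match iff some alternative is a prefix of the
-- gene, and group(1) is the LEFTMOST (first-listed) such alternative; this is exactly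
-- List.find? over the alternatives with a startswith test — exact, ported by hand.
def find_prefixes_in_row_alt (contig_genes_str : String) : List String :=
  ((PySem.Str.split? contig_genes_str ",").getD []).foldl  -- sep "," ≠ "" so split? is always some
    (fun found gene =>
      match PREFIXES.find? (fun p => PySem.Str.startswith (PySem.Str.strip gene) p) with
      | some p => PySem.Set.add found p
      | none => found)
    PySem.Set.empty

-- ===== PRECONDITION & SPEC =====
def Spec_find_prefixes_in_row (contig_genes_str : String) (out : List String) : Prop := out = find_prefixes_in_row_alt contig_genes_str
instance (contig_genes_str : String) (out : List String) : Decidable (Spec_find_prefixes_in_row contig_genes_str out) := by unfold Spec_find_prefixes_in_row; infer_instance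

-- ===== CLAIM (what is proved, stated in full; the proofs are below) =====
def Claim_equal_find_prefixes_in_row : Prop := ∀ (contig_genes_str : String), Dom_find_prefixes_in_row contig_genes_str → Spec_find_prefixes_in_row contig_genes_str (find_prefixes_in_row contig_genes_str)

-- ===== LEMMAS AND PROOFS =====

-- No two distinct PREFIXES are prefixes of one another (decidable on the literals).
theorem prefixes_pairwise_nonprefix :
    PREFIXES.Pairwise (fun p q => ¬ p.toList <+: q.toList ∧ ¬ q.toList <+: p.toList) := by
  decide

-- Two mutually non-prefix strings cannot both be prefixes of the same gene.
theorem not_both_startswith (g p q : String)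
    (h : ¬ p.toList <+: q.toList ∧ ¬ q.toList <+: p.toList) :
    ¬ (PySem.Str.startswith g p = true ∧ PySem.Str.startswith g q = true) := by
  rintro ⟨hp, hq⟩
  rw [PySem.Str.startswith_eq, PySem.Chars.startswith_iff] at hp hq
  rcases List.prefix_or_prefix_of_prefix hp hq with h1 | h1
  · exact h.1 h1
  · exact h.2 h1

-- If no element of l matches, the inner fold is the identity.
theorem foldl_no_match (g : String) (l : List String) (found : List String)
    (h : ∀ q ∈ l, PySem.Str.startswith g q = false) :
    l.foldl (fun found pfx =>
        if PySem.Str.startswith g pfx then PySem.Set.add found pfx else found) found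
      = found := by
  induction l generalizing found with
  | nil => rfl
  | cons p rest ih =>
      simp only [List.foldl_cons, h p (by simp)]
      exact ih found (fun q hq => h q (by simp [hq]))

-- A's scan-all-and-add over a pairwise-non-matching list equals adding the first match.
theorem foldl_eq_find (g : String) (l : List String) (found : List String)
    (h : l.Pairwise (fun p q => ¬ (PySem.Str.startswith g p = true ∧ PySem.Str.startswith g q = true))) :
    l.foldl (fun found pfx =>
        if PySem.Str.startswith g pfx then PySem.Set.add found pfx else found) found
      = (match l.find? (fun p => PySem.Str.startswith g p) with
         | some p => PySem.Set.add found p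
         | none => found) := by
  induction l generalizing found with
  | nil => rfl
  | cons p rest ih =>
      rcases List.pairwise_cons.1 h with ⟨hp, hrest⟩
      by_cases hsw : PySem.Str.startswith g p = true
      · simp only [List.foldl_cons, List.find?_cons, hsw, if_pos]
        exact foldl_no_match g rest (PySem.Set.add found p)
          (fun q hq => by
            have := hp q hq
            cases hq' : PySem.Str.startswith g q
            · rfl
            · exact absurd ⟨hsw, hq'⟩ this)
      · have hsw' : PySem.Str.startswith g p = false := by
          cases h' : PySem.Str.startswith g p
          · rfl
          · exact absurd h' hsw
        simp only [List.foldl_cons, List.find?_cons, hsw', Bool.false_eq_true,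
          not_false_eq_true, if_neg]
        exact ih found hrest

theorem prefixes_pairwise_nomatch (g : String) :
    PREFIXES.Pairwise (fun p q => ¬ (PySem.Str.startswith g p = true ∧ PySem.Str.startswith g q = true)) :=
  prefixes_pairwise_nonprefix.imp (fun h => not_both_startswith g _ _ h)

-- ===== VERDICT (by name: the statement is the Claim_ definition above) =====
theorem find_prefixes_in_row_spec : Claim_equal_find_prefixes_in_row := by
  intro s _
  unfold Spec_find_prefixes_in_row find_prefixes_in_row find_prefixes_in_row_alt
  simp only [List.foldl_map]
  have hstep : (fun (found : List String) (gene : String) =>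
      PREFIXES.foldl
        (fun found pfx =>
          if PySem.Str.startswith (PySem.Str.strip gene) pfx then PySem.Set.add found pfx else found)
        found)
    = (fun (found : List String) (gene : String) =>
      match PREFIXES.find? (fun p => PySem.Str.startswith (PySem.Str.strip gene) p) with
      | some p => PySem.Set.add found p
      | none => found) :=
    funext fun found => funext fun gene =>
      foldl_eq_find (PySem.Str.strip gene) PREFIXES found (prefixes_pairwise_nomatch _)
  rw [hstep]
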